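-- pv_equiv track=rewrite | github.com/kirill-kondrashov/lean-misc | tools/problem1_odd_profile_search.py | outside_high_boundary_count_from_upper_downset
-- ===== SOURCE A (Python) =====
-- from typing import Dict, Iterable, List, Sequence, Set, Tuple
--
-- def subset_cardinality(mask: int) -> int:
--     return mask.bit_count()
--
-- def outside_high_boundary_count_from_upper_downset(
--     upper_downset: Sequence[int], family_n_set: Set[int], subsets: Sequence[int]
-- ) -> int:
--     upper_downset_set = set(upper_downset)
--     count = 0
--     for subset in subsets:
--         if subset in family_n_set or subset_cardinality(subset) <= 4:
--             continue
--         candidates = subset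
--         while candidates:
--             bit = candidates & -candidates
--             predecessor = subset ^ bit
--             if predecessor in upper_downset_set:
--                 count += 1
--                 break
--             candidates ^= bit
--     return count
-- ===== SOURCE B (Python) =====
-- def outside_high_boundary_count_from_upper_downset(upper_downset, family_n_set, subsets):
--     # Build the bit universe from the (nonnegative) masks in subsets.
--     universe = 0
--     for s in subsets:
--         if s >= 0:
--             universe |= s
--     # marked = every successor T | (1 << i) of a T in upper_downset, for a
--     # universe bit i not already set in T (negative T's successors are negative
--     # and can never equal a nonnegative mask, so they are not needed).
--     marked = set()
--     for t in upper_downset: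
--         if t < 0:
--             continue
--         bits = universe ^ (universe & t)  # universe bits not set in t
--         while bits:
--             b = bits & -bits
--             marked.add(t | b)
--             bits ^= b
--     count = 0
--     for s in subsets:
--         if s not in family_n_set and s.bit_count() > 4 and s in marked:
--             count += 1
--     return count
-- ===== Notes on version B (the rewrite author's own statement) =====
-- stated objective: alternative
-- what changed: Instead of scanning each subset's bits and probing upper_downset for every one-bit predecessor, B precomputes the set of all one-bit successors of upper_downset elements (over the bit universe of the subsets) and then counts subsets by a single membership lookup each.
-- outside the precondition, e.g. on outside_high_boundary_count_from_upper_downset([-32], set(), [-31]): A returns 1, B returns 0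
import Mathlib
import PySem

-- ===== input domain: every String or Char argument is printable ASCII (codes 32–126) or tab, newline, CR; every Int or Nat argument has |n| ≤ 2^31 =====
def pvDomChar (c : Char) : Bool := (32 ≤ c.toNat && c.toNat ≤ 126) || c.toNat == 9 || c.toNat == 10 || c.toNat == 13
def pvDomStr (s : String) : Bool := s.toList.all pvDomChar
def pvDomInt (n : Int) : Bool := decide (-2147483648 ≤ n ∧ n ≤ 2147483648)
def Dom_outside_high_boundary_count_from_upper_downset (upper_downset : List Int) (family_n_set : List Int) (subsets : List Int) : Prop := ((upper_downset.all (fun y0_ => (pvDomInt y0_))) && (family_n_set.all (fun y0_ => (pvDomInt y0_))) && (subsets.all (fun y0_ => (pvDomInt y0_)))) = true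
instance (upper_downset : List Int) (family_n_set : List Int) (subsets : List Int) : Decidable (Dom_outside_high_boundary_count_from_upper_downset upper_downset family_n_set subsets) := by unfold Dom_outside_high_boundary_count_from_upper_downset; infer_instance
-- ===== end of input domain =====

-- B replaces A's per-subset scan over removable bits by one precomputed set of all
-- one-bit successors of upper_downset elements, then a single membership pass over subsets.

-- ===== PORT A =====

def subset_cardinality (mask : Int) : Int := (PySem.Int.bitCount mask : Int)

-- lowest set bit of a nonzero Nat; for nonnegative candidates this is Python's
-- `candidates & -candidates`
def pvLowBit (n : Nat) : Nat :=
  if h : n = 0 then 0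
  else if n % 2 = 1 then 1
  else 2 * pvLowBit (n / 2)
termination_by n
decreasing_by omega

-- A's inner `while candidates:` loop, exact for nonnegative subset (only such subsets
-- reach it under Pre_; on a negative subset Python's loop does not terminate).
-- It returns whether `count += 1; break` fired; each step clears one set bit, so
-- fuel = initial candidates bounds the iteration count.
def pvLoopA (upper_downset_set : PySem.Set Int) (subset : Nat) : Nat → Nat → Bool
  | _, 0 => false
  | candidates, fuel + 1 =>
    if candidates = 0 then false
    else
      let bit := pvLowBit candidates
      let predecessor := subset ^^^ bit
      if ((predecessor : Int) ∈ upper_downset_set) then true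
      else pvLoopA upper_downset_set subset (candidates ^^^ bit) fuel

def outside_high_boundary_count_from_upper_downset (upper_downset : List Int) (family_n_set : List Int) (subsets : List Int) : Int :=
  let upper_downset_set : PySem.Set Int := PySem.Set.ofList upper_downset
  subsets.foldl
    (fun count subset =>
      if subset ∈ family_n_set ∨ subset_cardinality subset ≤ 4 then count
      else if pvLoopA upper_downset_set subset.toNat subset.toNat subset.toNat then count + 1
      else count)
    0

-- ===== PORT B =====

-- B's inner `while bits:` loop: add t | b to marked for every set bit b of bits
-- (bits is a nonnegative mask; fuel = initial bits bounds the iteration count)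
def pvMarkBits (t : Nat) : Nat → Nat → PySem.Set Int → PySem.Set Int
  | _, 0, marked => marked
  | bits, fuel + 1, marked =>
    if bits = 0 then marked
    else
      let b := pvLowBit bits
      pvMarkBits t (bits ^^^ b) fuel (PySem.Set.add marked ((t ||| b : Nat) : Int))

def pvBuildMarked (univBits : Nat) (upper_downset : List Int) : PySem.Set Int :=
  upper_downset.foldl
    (fun marked t =>
      if t < 0 then marked
      else
        let bits := univBits ^^^ (univBits &&& t.toNat)
        pvMarkBits t.toNat bits bits marked)
    PySem.Set.empty

def outside_high_boundary_count_from_upper_downset_alt (upper_downset : List Int) (family_n_set : List Int) (subsets : List Int) : Int :=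
  -- `universe` in Source B (a Lean keyword, hence univ): bit positions of the nonnegative masks
  let univ : Nat := subsets.foldl (fun (u : Nat) (s : Int) => if 0 ≤ s then u ||| s.toNat else u) 0
  let marked := pvBuildMarked univ upper_downset
  subsets.foldl
    (fun count s =>
      if s ∉ family_n_set ∧ 4 < (PySem.Int.bitCount s : Int) ∧ s ∈ marked then count + 1
      else count)
    0

-- ===== PRECONDITION & SPEC =====
-- Pre_ excludes subsets containing a negative element that is neither in family_n_set nor of
-- bit_count ≤ 4: on such inputs A's bit-peeling loop runs over an infinite two's-complement
-- mask and either diverges or returns only via an accidental match on a negative predecessor.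
def Pre_outside_high_boundary_count_from_upper_downset (upper_downset : List Int) (family_n_set : List Int) (subsets : List Int) : Prop :=
  ∀ s ∈ subsets, 0 ≤ s ∨ s ∈ family_n_set ∨ PySem.Int.bitCount s ≤ 4
instance (upper_downset : List Int) (family_n_set : List Int) (subsets : List Int) : Decidable (Pre_outside_high_boundary_count_from_upper_downset upper_downset family_n_set subsets) := by unfold Pre_outside_high_boundary_count_from_upper_downset; infer_instance

def pvWitness_outside_high_boundary_count_from_upper_downset : List Int × List Int × List Int := ([3], [0], [7, 35, 62])

def Spec_outside_high_boundary_count_from_upper_downset (upper_downset : List Int) (family_n_set : List Int) (subsets : List Int) (out : Int) : Prop := out = outside_high_boundary_count_from_upper_downset_alt upper_downset family_n_set subsets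
instance (upper_downset : List Int) (family_n_set : List Int) (subsets : List Int) (out : Int) : Decidable (Spec_outside_high_boundary_count_from_upper_downset upper_downset family_n_set subsets out) := by unfold Spec_outside_high_boundary_count_from_upper_downset; infer_instance

-- ===== CLAIM (what is proved, stated in full; the proofs are below) =====
def Claim_equal_outside_high_boundary_count_from_upper_downset : Prop := ∀ (upper_downset : List Int) (family_n_set : List Int) (subsets : List Int), Dom_outside_high_boundary_count_from_upper_downset upper_downset family_n_set subsets → Pre_outside_high_boundary_count_from_upper_downset upper_downset family_n_set subsets → Spec_outside_high_boundary_count_from_upper_downset upper_downset family_n_set subsets (outside_high_boundary_count_from_upper_downset upper_downset family_n_set subsets)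

-- ===== LEMMAS AND PROOFS =====

theorem pvLowBit_spec (n : Nat) (h : n ≠ 0) : ∃ i, pvLowBit n = 2 ^ i ∧ n.testBit i = true := by
  induction n using Nat.strong_induction_on with
  | _ n ih =>
    unfold pvLowBit
    rw [dif_neg h]
    by_cases h2 : n % 2 = 1
    · rw [if_pos h2]
      exact ⟨0, by norm_num, by simp [Nat.testBit_zero]; omega⟩
    · rw [if_neg h2]
      obtain ⟨i, e, b⟩ := ih (n / 2) (by omega) (by omega)
      exact ⟨i + 1, by rw [e, pow_succ]; ring, by rw [Nat.testBit_add_one]; exact b⟩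

theorem pvXorPowLt (n i : Nat) (h : n.testBit i = true) : n ^^^ 2 ^ i < n := by
  apply Nat.lt_of_testBit i
  · simp [Nat.testBit_xor, h]
  · exact h
  · intro j hj
    have hij : i ≠ j := by omega
    simp [Nat.testBit_xor, Nat.testBit_two_pow, decide_eq_false hij]

theorem pvExistsBitSplit (bits i0 : Nat) (h : bits.testBit i0 = true) (P : Nat → Prop) :
    (∃ i, bits.testBit i = true ∧ P i) ↔ P i0 ∨ ∃ i, (bits ^^^ 2 ^ i0).testBit i = true ∧ P i := by
  constructor
  · rintro ⟨i, hb, hp⟩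
    by_cases hi : i = i0
    · exact Or.inl (hi ▸ hp)
    · refine Or.inr ⟨i, ?_, hp⟩
      simp [Nat.testBit_xor, hb, Nat.testBit_two_pow, decide_eq_false (Ne.symm hi)]
  · rintro (hp | ⟨i, hb, hp⟩)
    · exact ⟨i0, h, hp⟩
    · by_cases hi : i = i0
      · subst hi
        simp [Nat.testBit_xor, Nat.testBit_two_pow, h] at hb
      · refine ⟨i, ?_, hp⟩
        simpa [Nat.testBit_xor, Nat.testBit_two_pow, decide_eq_false (Ne.symm hi)] using hb

theorem pvLoopA_iff (U : PySem.Set Int) (subset : Nat) :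
    ∀ fuel candidates, candidates ≤ fuel →
      (pvLoopA U subset candidates fuel = true ↔
        ∃ i, candidates.testBit i = true ∧ ((subset ^^^ 2 ^ i : Nat) : Int) ∈ U) := by
  intro fuel
  induction fuel with
  | zero =>
    intro c hc
    interval_cases c
    simp [pvLoopA]
  | succ fuel ih =>
    intro c hc
    by_cases h0 : c = 0
    · subst h0; simp [pvLoopA]
    · obtain ⟨i0, e, hb⟩ := pvLowBit_spec c h0
      rw [pvExistsBitSplit c i0 hb]
      simp only [pvLoopA, if_neg h0]
      rw [e]
      by_cases hmem : ((subset ^^^ 2 ^ i0 : Nat) : Int) ∈ U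
      · simp [hmem]
      · rw [if_neg hmem, ih (c ^^^ 2 ^ i0) (by have := pvXorPowLt c i0 hb; omega)]
        simp [hmem]

theorem pvMarkBits_mem (t : Nat) :
    ∀ fuel bits marked (x : Int), bits ≤ fuel →
      (x ∈ pvMarkBits t bits fuel marked ↔
        x ∈ marked ∨ ∃ i, bits.testBit i = true ∧ x = ((t ||| 2 ^ i : Nat) : Int)) := by
  intro fuel
  induction fuel with
  | zero =>
    intro bits marked x hb
    interval_cases bits
    simp [pvMarkBits]
  | succ fuel ih =>
    intro bits marked x hb
    by_cases h0 : bits = 0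
    · subst h0; simp [pvMarkBits]
    · obtain ⟨i0, e, hbit⟩ := pvLowBit_spec bits h0
      rw [pvExistsBitSplit bits i0 hbit]
      simp only [pvMarkBits, if_neg h0]
      rw [e, ih (bits ^^^ 2 ^ i0) _ x (by have := pvXorPowLt bits i0 hbit; omega),
        PySem.Set.mem_add]
      tauto

theorem pvBuildMarked_mem (univBits : Nat) (upper_downset : List Int) (x : Int) :
    x ∈ pvBuildMarked univBits upper_downset ↔
      ∃ t ∈ upper_downset, 0 ≤ t ∧
        ∃ i, (univBits ^^^ (univBits &&& t.toNat)).testBit i = true ∧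
          x = ((t.toNat ||| 2 ^ i : Nat) : Int) := by
  have go : ∀ (l : List Int) (marked : PySem.Set Int),
      x ∈ l.foldl (fun marked t =>
          if t < 0 then marked
          else
            let bits := univBits ^^^ (univBits &&& t.toNat)
            pvMarkBits t.toNat bits bits marked) marked ↔
        x ∈ marked ∨ ∃ t ∈ l, 0 ≤ t ∧
          ∃ i, (univBits ^^^ (univBits &&& t.toNat)).testBit i = true ∧
            x = ((t.toNat ||| 2 ^ i : Nat) : Int) := by
    intro l
    induction l with
    | nil => simp
    | cons t l ihl =>
      intro marked
      simp only [List.foldl_cons, List.mem_cons]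
      by_cases ht : t < 0
      · rw [if_pos ht, ihl]
        constructor
        · rintro (hm | ⟨t', ht', h0, i, hi, hx⟩)
          · exact Or.inl hm
          · exact Or.inr ⟨t', Or.inr ht', h0, i, hi, hx⟩
        · rintro (hm | ⟨t', ht', h0, i, hi, hx⟩)
          · exact Or.inl hm
          · rcases ht' with rfl | ht'
            · exact absurd h0 (by omega)
            · exact Or.inr ⟨t', ht', h0, i, hi, hx⟩
      · rw [if_neg ht, ihl, pvMarkBits_mem t.toNat _ _ _ x le_rfl]
        constructor
        · rintro ((hm | ⟨i, hi, hx⟩) | ⟨t', ht', h0, i, hi, hx⟩)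
          · exact Or.inl hm
          · exact Or.inr ⟨t, Or.inl rfl, by omega, i, hi, hx⟩
          · exact Or.inr ⟨t', Or.inr ht', h0, i, hi, hx⟩
        · rintro (hm | ⟨t', ht', h0, i, hi, hx⟩)
          · exact Or.inl (Or.inl hm)
          · rcases ht' with rfl | ht'
            · exact Or.inl (Or.inr ⟨i, hi, hx⟩)
            · exact Or.inr ⟨t', ht', h0, i, hi, hx⟩
  rw [pvBuildMarked, go]
  simp [PySem.Set.empty]

theorem pvUniverse_testBit (subsets : List Int) (s : Int) (hs : s ∈ subsets) (h0 : 0 ≤ s)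
    (i : Nat) (hb : s.toNat.testBit i = true) :
    (subsets.foldl (fun (u : Nat) (s : Int) => if 0 ≤ s then u ||| s.toNat else u) 0).testBit i = true := by
  have mono : ∀ (l : List Int) (u : Nat), u.testBit i = true →
      (l.foldl (fun (u : Nat) (s : Int) => if 0 ≤ s then u ||| s.toNat else u) u).testBit i = true := by
    intro l
    induction l with
    | nil => intro u h; simpa using h
    | cons a l ihl =>
      intro u h
      simp only [List.foldl_cons]
      split
      · exact ihl _ (by simp [Nat.testBit_or, h])
      · exact ihl _ h
  have go : ∀ (l : List Int) (u : Nat), s ∈ l →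
      (l.foldl (fun (u : Nat) (s : Int) => if 0 ≤ s then u ||| s.toNat else u) u).testBit i = true := by
    intro l
    induction l with
    | nil => intro u h; simp at h
    | cons a l ihl =>
      intro u hmem
      simp only [List.foldl_cons]
      rcases List.mem_cons.mp hmem with rfl | hmem
      · rw [if_pos h0]
        exact mono l _ (by simp [Nat.testBit_or, hb])
      · exact ihl _ hmem
  exact go subsets 0 hs

-- the bridge: for a nonnegative s occurring in subsets, membership in marked is exactly
-- "some single-bit predecessor of s lies in upper_downset"
theorem pvMarked_iff (upper_downset subsets : List Int) (s : Int) (hs : s ∈ subsets) (h0 : 0 ≤ s) :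
    (s ∈ pvBuildMarked (subsets.foldl (fun (u : Nat) (s : Int) => if 0 ≤ s then u ||| s.toNat else u) 0) upper_downset ↔
      ∃ i, s.toNat.testBit i = true ∧ ((s.toNat ^^^ 2 ^ i : Nat) : Int) ∈ upper_downset) := by
  rw [pvBuildMarked_mem]
  constructor
  · rintro ⟨t, ht, ht0, i, hi, hx⟩
    have hbits : (subsets.foldl (fun (u : Nat) (s : Int) => if 0 ≤ s then u ||| s.toNat else u) 0).testBit i = true
        ∧ t.toNat.testBit i = false := by
      simp only [Nat.testBit_xor, Nat.testBit_and] at hi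
      cases hu : (subsets.foldl (fun (u : Nat) (s : Int) => if 0 ≤ s then u ||| s.toNat else u) 0).testBit i <;>
        cases htb : t.toNat.testBit i
      · rw [hu, htb] at hi; simp at hi
      · rw [hu, htb] at hi; simp at hi
      · exact ⟨rfl, rfl⟩
      · rw [hu, htb] at hi; simp at hi
    have hsN : s.toNat = t.toNat ||| 2 ^ i := by omega
    refine ⟨i, by simp [hsN, Nat.testBit_or, Nat.testBit_two_pow], ?_⟩
    have hx2 : s.toNat ^^^ 2 ^ i = t.toNat := by
      apply Nat.eq_of_testBit_eq
      intro j
      by_cases hj : j = i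
      · subst hj
        simp [hsN, Nat.testBit_xor, Nat.testBit_or, Nat.testBit_two_pow, hbits.2]
      · simp [hsN, Nat.testBit_xor, Nat.testBit_or, Nat.testBit_two_pow,
          decide_eq_false (Ne.symm hj)]
    rw [hx2]
    rwa [Int.toNat_of_nonneg ht0]
  · rintro ⟨i, hbit, hmem⟩
    refine ⟨((s.toNat ^^^ 2 ^ i : Nat) : Int), hmem, Int.natCast_nonneg _, i, ?_, ?_⟩
    · have hu := pvUniverse_testBit subsets s hs h0 i hbit
      simp [Int.toNat_natCast, Nat.testBit_xor, Nat.testBit_and, Nat.testBit_two_pow, hu, hbit]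
    · have he : ((s.toNat ^^^ 2 ^ i : Nat) : Int).toNat ||| 2 ^ i = s.toNat := by
        simp only [Int.toNat_natCast]
        apply Nat.eq_of_testBit_eq
        intro j
        by_cases hj : j = i
        · subst hj
          simp [Nat.testBit_or, Nat.testBit_xor, Nat.testBit_two_pow, hbit]
        · simp [Nat.testBit_or, Nat.testBit_xor, Nat.testBit_two_pow,
            decide_eq_false (Ne.symm hj)]
      rw [he]
      exact (Int.toNat_of_nonneg h0).symm

theorem pvFoldlExtMem {α β : Type} (f g : β → α → β) (l : List α)
    (h : ∀ b, ∀ a ∈ l, f b a = g b a) : ∀ init, l.foldl f init = l.foldl g init := by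
  induction l with
  | nil => intro init; rfl
  | cons a l ihl =>
    intro init
    simp only [List.foldl_cons]
    rw [h init a (List.mem_cons_self ..)]
    exact ihl (fun b a ha => h b a (List.mem_cons_of_mem _ ha)) _

-- ===== VERDICT (by name: the statement is the Claim_ definition above) =====
theorem outside_high_boundary_count_from_upper_downset_spec : Claim_equal_outside_high_boundary_count_from_upper_downset := by
  intro upper_downset family_n_set subsets _hdom hpre
  unfold Spec_outside_high_boundary_count_from_upper_downset
  have ha : outside_high_boundary_count_from_upper_downset upper_downset family_n_set subsets =
      subsets.foldl
        (fun count subset =>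
          if subset ∈ family_n_set ∨ subset_cardinality subset ≤ 4 then count
          else if pvLoopA (PySem.Set.ofList upper_downset) subset.toNat subset.toNat subset.toNat
            then count + 1 else count) 0 := rfl
  have hb : outside_high_boundary_count_from_upper_downset_alt upper_downset family_n_set subsets =
      subsets.foldl
        (fun count s =>
          if s ∉ family_n_set ∧ 4 < (PySem.Int.bitCount s : Int) ∧
              s ∈ pvBuildMarked (subsets.foldl (fun (u : Nat) (s : Int) => if 0 ≤ s then u ||| s.toNat else u) 0)
                upper_downset
            then count + 1 else count) 0 := rfl
  rw [ha, hb]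
  apply pvFoldlExtMem
  intro count s hsmem
  by_cases hfam : s ∈ family_n_set
  · simp [hfam]
  · by_cases hcard : subset_cardinality s ≤ 4
    · have h4 : ¬ (4 : Int) < (PySem.Int.bitCount s : Int) := by
        simp only [subset_cardinality] at hcard; omega
      simp [hfam, hcard, h4]
    · have h4 : (4 : Int) < (PySem.Int.bitCount s : Int) := by
        simp only [subset_cardinality] at hcard; omega
      have h0 : 0 ≤ s := by
        rcases hpre s hsmem with h | h | h
        · exact h
        · exact absurd h hfam
        · exfalso; simp only [subset_cardinality] at hcard; omega
      rw [if_neg (by tauto)]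
      have hloop := pvLoopA_iff (PySem.Set.ofList upper_downset) s.toNat s.toNat s.toNat le_rfl
      have hmark := pvMarked_iff upper_downset subsets s hsmem h0
      by_cases hm : s ∈ pvBuildMarked (subsets.foldl (fun (u : Nat) (s : Int) => if 0 ≤ s then u ||| s.toNat else u) 0) upper_downset
      · have hl : pvLoopA (PySem.Set.ofList upper_downset) s.toNat s.toNat s.toNat = true := by
          rw [hloop]
          obtain ⟨i, hbt, hmem⟩ := hmark.mp hm
          exact ⟨i, hbt, by rwa [PySem.Set.mem_ofList]⟩
        simp [hl, hfam, h4, hm]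
      · have hl : pvLoopA (PySem.Set.ofList upper_downset) s.toNat s.toNat s.toNat = false := by
          rw [Bool.eq_false_iff]
          intro hc
          rw [hloop] at hc
          obtain ⟨i, hbt, hmem⟩ := hc
          exact hm (hmark.mpr ⟨i, hbt, by rwa [PySem.Set.mem_ofList] at hmem⟩)
        simp [hl, hfam, h4, hm]
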